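-- pv_equiv track=rewrite | github.com/ZihengZZH/sentiment-analysis | src/utils/cv_partition.py | n_fold_RR
-- ===== SOURCE A (Python) =====
-- def n_fold_RR(no_fold, length_data):
--     """Round-robin splitting mod 10
--     """
--     mod = no_fold  # basically the same
--     test_splits = list()
--     length_split = int(length_data / no_fold)
--     for i in range(no_fold):
--         test_split = list()
--         for j in range(length_split):
--             test_split.append(i+mod*j)
--         test_splits.append(test_split)
--     return test_splits
-- ===== SOURCE B (Python) =====
-- def n_fold_RR(no_fold, length_data):
--     """Round-robin splitting: one dealing pass instead of nested loops."""
--     length_split = int(length_data / no_fold)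
--     test_splits = [[] for _ in range(no_fold)]
--     for k in range(len(test_splits) * length_split):
--         test_splits[k % no_fold].append(k)
--     return test_splits
-- ===== Notes on version B (the rewrite author's own statement) =====
-- stated objective: alternative
-- what changed: Replaces the nested fold-by-fold loops (one inner loop per fold building i, i+n, i+2n, ...) by a single round-robin dealing pass that walks k over range(no_fold*length_split) once and appends k to fold k % no_fold.
import Mathlib
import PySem

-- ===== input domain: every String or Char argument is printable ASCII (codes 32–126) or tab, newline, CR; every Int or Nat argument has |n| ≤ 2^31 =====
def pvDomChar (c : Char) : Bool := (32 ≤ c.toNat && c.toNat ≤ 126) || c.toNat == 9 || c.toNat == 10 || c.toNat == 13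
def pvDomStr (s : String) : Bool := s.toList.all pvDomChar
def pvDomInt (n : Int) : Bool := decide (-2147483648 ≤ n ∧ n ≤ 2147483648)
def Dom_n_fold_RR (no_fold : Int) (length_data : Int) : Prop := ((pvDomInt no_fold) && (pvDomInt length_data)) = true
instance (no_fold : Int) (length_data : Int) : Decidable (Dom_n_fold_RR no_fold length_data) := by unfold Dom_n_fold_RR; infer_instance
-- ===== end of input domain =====

-- ===== PORT A =====
-- Port of A: nested loops, fold i collects i + no_fold*j for j < length_split.
-- list.append is ported as Array.push (O(1), like Python's append); the returned value is the same list.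
-- int(length_data / no_fold) is exact truncating division on Dom (|args| ≤ 2^31 < 2^53): PySem.Int.truncdiv.
def n_fold_RR (no_fold : Int) (length_data : Int) : List (List Int) :=
  let mod := no_fold
  let length_split := PySem.Int.truncdiv length_data no_fold
  ((PySem.List.pyRange 0 no_fold 1).foldl
    (fun test_splits i =>
      test_splits.push
        (((PySem.List.pyRange 0 length_split 1).foldl
            (fun test_split j => test_split.push (i + mod * j)) #[]).toList))
    (#[] : Array (List Int))).toList

-- ===== PORT B =====
-- Port of B: one dealing pass; k is appended (Array.push) to fold k % no_fold.
def n_fold_RR_alt (no_fold : Int) (length_data : Int) : List (List Int) :=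
  let length_split := PySem.Int.truncdiv length_data no_fold
  let test_splits : Array (Array Int) :=
    ((PySem.List.pyRange 0 no_fold 1).map (fun _ => (#[] : Array Int))).toArray
  (((PySem.List.pyRange 0 ((test_splits.size : Int) * length_split) 1).foldl
      (fun acc k => acc.modify (PySem.Int.mod k no_fold).toNat (·.push k)) test_splits).toList).map
    Array.toList

-- ===== PRECONDITION & SPEC =====
-- Pre_ excludes exactly no_fold = 0, where Python A (and B) raise ZeroDivisionError.
def Pre_n_fold_RR (no_fold : Int) (length_data : Int) : Prop := no_fold ≠ 0
instance (no_fold : Int) (length_data : Int) : Decidable (Pre_n_fold_RR no_fold length_data) := by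
  unfold Pre_n_fold_RR; infer_instance
def pvWitness_n_fold_RR : Int × Int := (3, 10)
def Spec_n_fold_RR (no_fold : Int) (length_data : Int) (out : List (List Int)) : Prop := out = n_fold_RR_alt no_fold length_data
instance (no_fold : Int) (length_data : Int) (out : List (List Int)) : Decidable (Spec_n_fold_RR no_fold length_data out) := by unfold Spec_n_fold_RR; infer_instance

-- ===== CLAIM (what is proved, stated in full; the proofs are below) =====
def Claim_equal_n_fold_RR : Prop := ∀ (no_fold : Int) (length_data : Int), Dom_n_fold_RR no_fold length_data → Pre_n_fold_RR no_fold length_data → Spec_n_fold_RR no_fold length_data (n_fold_RR no_fold length_data)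

-- ===== LEMMAS AND PROOFS =====

-- modify at the index right after a prefix rewrites the head of the suffix
theorem modify_append_cons {α : Type} (pre : List α) (h : α) (t : List α) (f : α → α) :
    (pre ++ h :: t).modify pre.length f = pre ++ f h :: t := by
  induction pre with
  | nil => simp [List.modify]
  | cons a p ih => simpa [List.modify] using ih

-- dealing a run of consecutive integers b, b+1, … into buckets pre ++ ss, where b lands
-- exactly on bucket pre.length, appends each k to its own bucket in order
theorem deal_run (n : Int) (hn : 0 < n) (ss : List (List Int)) :
    ∀ (pre : List (List Int)) (b : Int), 0 ≤ b →
    PySem.Int.mod b n = (pre.length : Int) → (pre.length : Int) + (ss.length : Int) ≤ n →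
    (PySem.List.pyRange b (b + ss.length) 1).foldl
        (fun acc k => acc.modify (PySem.Int.mod k n).toNat (· ++ [k])) (pre ++ ss)
      = pre ++ List.zipWith (fun l k => l ++ [k]) ss (PySem.List.pyRange b (b + ss.length) 1) := by
  induction ss with
  | nil =>
    intro pre b _ _ _
    simp
  | cons h t ih =>
    intro pre b hb hmod hlen
    simp only [List.length_cons] at hlen ⊢
    push_cast at hlen ⊢
    have hblt : b < b + ((t.length : Int) + 1) := by omega
    rw [PySem.List.pyRange_one_cons hblt]
    simp only [List.foldl_cons, List.zipWith_cons_cons]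
    have hidx : (PySem.Int.mod b n).toNat = pre.length := by rw [hmod]; simp
    rw [hidx, modify_append_cons]
    rcases t with _ | ⟨t0, ts⟩
    · rw [PySem.List.pyRange_one_eq_nil (by norm_num : b + (((List.nil (α := List Int)).length : Int) + 1) ≤ b + 1)]
      simp
    · have hts : (((t0 :: ts).length : Int)) = (ts.length : Int) + 1 := by simp only [List.length_cons]; push_cast; ring
      have hplt : (pre.length : Int) + 1 < n := by omega
      have hmod' : PySem.Int.mod (b + 1) n = ((pre ++ [h ++ [b]]).length : Int) := by
        rw [PySem.Int.mod_eq_emod_of_pos hn] at hmod ⊢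
        have hdm := Int.mul_ediv_add_emod b n
        have hb1 : b + 1 = ((pre.length : Int) + 1) + n * (b / n) := by omega
        rw [hb1, Int.add_mul_emod_self_left, Int.emod_eq_of_lt (by positivity) hplt]
        simp
      have hih := ih (pre ++ [h ++ [b]]) (b + 1) (by omega) hmod'
        (by simp only [List.length_append, List.length_cons, List.length_nil]; push_cast; omega)
      rw [show b + (((t0 :: ts).length : Int) + 1) = (b + 1) + ((t0 :: ts).length : Int) by ring]
      simpa only [List.append_assoc, List.singleton_append] using hih

-- the dealing pass over range(n*m) from n empty buckets builds exactly A's folds with m columns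
theorem main_pos (n : Int) (hn : 0 < n) (m : Nat) :
    (PySem.List.pyRange 0 (n * m) 1).foldl
        (fun acc k => acc.modify (PySem.Int.mod k n).toNat (· ++ [k]))
        ((PySem.List.pyRange 0 n 1).map (fun _ => ([] : List Int)))
      = (PySem.List.pyRange 0 n 1).map
          (fun i => (PySem.List.pyRange 0 (m : Int) 1).map (fun j => i + n * j)) := by
  induction m with
  | zero =>
    simp [PySem.List.pyRange_zero]
  | succ m ih =>
    have h0 : (0:Int) ≤ n * m := by positivity
    have hsplit : PySem.List.pyRange 0 (n * ((m+1 : Nat) : Int)) 1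
        = PySem.List.pyRange 0 (n * m) 1 ++ PySem.List.pyRange (n * m) (n * m + n) 1 := by
      rw [show n * ((m+1 : Nat) : Int) = n * m + n by push_cast; ring]
      exact PySem.List.pyRange_one_append 0 (n * m) (n * m + n) h0 (by omega)
    rw [hsplit, List.foldl_append, ih]
    have hlen : (((PySem.List.pyRange 0 n 1).map
        (fun i => (PySem.List.pyRange 0 (m : Int) 1).map (fun j => i + n * j))).length : Int) = n := by
      simp [PySem.List.length_pyRange_one]; omega
    have hrun := deal_run n hn
      ((PySem.List.pyRange 0 n 1).map (fun i => (PySem.List.pyRange 0 (m : Int) 1).map (fun j => i + n * j)))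
      [] (n * m) h0 (by simpa using (PySem.Int.mod_eq_zero_iff_dvd (n * m) n).mpr ⟨m, rfl⟩)
      (by simpa using le_of_eq hlen)
    simp only [List.nil_append] at hrun
    rw [show n * m + (((PySem.List.pyRange 0 n 1).map
        (fun i => (PySem.List.pyRange 0 (m : Int) 1).map (fun j => i + n * j))).length : Int) = n * m + n by omega] at hrun
    rw [hrun]
    -- columnwise: zipping the m-column table with the next block of indices adds column m
    apply List.ext_getElem
    · simp [PySem.List.length_pyRange_one]
    · intro i h1 h2
      have hi : i < (n - 0).toNat := by
        simpa [PySem.List.length_pyRange_one] using h2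
      have hin : (i : Int) < n := by omega
      rw [List.getElem_zipWith, List.getElem_map, List.getElem_map,
        PySem.List.getElem_pyRange_one, PySem.List.getElem_pyRange_one]
      rw [show ((m+1 : Nat) : Int) = (m : Int) + 1 by push_cast; ring,
        PySem.List.pyRange_one_succ_right (by positivity : (0:Int) ≤ (m:Int)), List.map_append]
      simp; ring

-- mapping a function through List.modify, given a commuting square on elements
theorem map_modify {α β : Type} (g : α → β) (f : α → α) (f' : β → β)
    (hc : ∀ a, g (f a) = f' (g a)) : ∀ (l : List α) (i : Nat),
    (l.modify i f).map g = (l.map g).modify i f' := by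
  intro l
  induction l with
  | nil => intro i; simp
  | cons a t ih =>
    intro i
    cases i with
    | zero => simp [List.modify, hc]
    | succ i =>
      apply List.ext_getElem
      · simp
      · intro j h1 h2
        simp only [List.getElem_map]
        rw [List.getElem_modify, List.getElem_modify]
        split_ifs with hij
        · rw [hc, List.getElem_map]
        · rw [List.getElem_map]

-- Port A computed on plain lists (Array.push is list append through toList)
theorem portA_toList (no_fold length_data : Int) :
    n_fold_RR no_fold length_data =
      (PySem.List.pyRange 0 no_fold 1).foldl
        (fun test_splits i =>
          test_splits ++
            [(PySem.List.pyRange 0 (PySem.Int.truncdiv length_data no_fold) 1).foldl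
              (fun test_split j => test_split ++ [i + no_fold * j]) []])
        [] := by
  unfold n_fold_RR
  have inner : ∀ i : Int,
      ((PySem.List.pyRange 0 (PySem.Int.truncdiv length_data no_fold) 1).foldl
          (fun test_split j => test_split.push (i + no_fold * j)) #[]).toList
        = (PySem.List.pyRange 0 (PySem.Int.truncdiv length_data no_fold) 1).foldl
            (fun test_split j => test_split ++ [i + no_fold * j]) [] := by
    intro i
    exact (List.foldl_hom Array.toList (by intro x y; simp)).symm
  rw [← List.foldl_hom (f := Array.toList) (init := (#[] : Array (List Int)))
    (g₂ := fun test_splits i =>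
      test_splits ++
        [(PySem.List.pyRange 0 (PySem.Int.truncdiv length_data no_fold) 1).foldl
          (fun test_split j => test_split ++ [i + no_fold * j]) []])
    (by intro x y; simp only [Array.toList_push, inner])]

-- Port B computed on plain lists
theorem portB_toList (no_fold length_data : Int) :
    n_fold_RR_alt no_fold length_data =
      (PySem.List.pyRange 0
          ((((PySem.List.pyRange 0 no_fold 1).map (fun _ => ([] : List Int))).length : Int) *
            PySem.Int.truncdiv length_data no_fold) 1).foldl
        (fun acc k => acc.modify (PySem.Int.mod k no_fold).toNat (· ++ [k]))
        ((PySem.List.pyRange 0 no_fold 1).map (fun _ => ([] : List Int))) := by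
  unfold n_fold_RR_alt
  dsimp only
  have hsize : ((((PySem.List.pyRange 0 no_fold 1).map (fun _ => (#[] : Array Int))).toArray).size : Int)
      = (((PySem.List.pyRange 0 no_fold 1).map (fun _ => ([] : List Int))).length : Int) := by
    simp
  rw [hsize]
  have hcomm : ∀ (x : Array (Array Int)) (y : Int),
      (fun acc k => acc.modify (PySem.Int.mod k no_fold).toNat (· ++ [k]))
          ((fun a : Array (Array Int) => a.toList.map Array.toList) x) y
        = (fun a : Array (Array Int) => a.toList.map Array.toList)
            ((fun acc k => acc.modify (PySem.Int.mod k no_fold).toNat (·.push k)) x y) := by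
    intro x y
    simp only [Array.toList_modify]
    exact (map_modify Array.toList (·.push y) (· ++ [y]) (by intro a; simp) _ _).symm
  have hinit : ((PySem.List.pyRange 0 no_fold 1).map (fun _ => ([] : List Int)))
      = (fun a : Array (Array Int) => a.toList.map Array.toList)
          (((PySem.List.pyRange 0 no_fold 1).map (fun _ => (#[] : Array Int))).toArray) := by
    simp
  rw [hinit, ← List.foldl_hom (f := fun a : Array (Array Int) => a.toList.map Array.toList)
    (g₂ := fun acc k => acc.modify (PySem.Int.mod k no_fold).toNat (· ++ [k])) hcomm]

-- ===== VERDICT (by name: the statement is the Claim_ definition above) =====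
theorem n_fold_RR_spec : Claim_equal_n_fold_RR := by
  intro no_fold length_data _ _
  unfold Spec_n_fold_RR
  rw [portA_toList, portB_toList]
  simp only [PySem.List.foldl_append_singleton_eq_map, List.nil_append]
  by_cases hn : 0 < no_fold
  · set L := PySem.Int.truncdiv length_data no_fold with hL
    have hlen : (((PySem.List.pyRange 0 no_fold 1).map (fun _ => ([] : List Int))).length : Int) = no_fold := by
      simp [PySem.List.length_pyRange_one]; omega
    rw [hlen]
    by_cases hLpos : 0 < L
    · have hm : L = ((L.toNat : Nat) : Int) := by omega
      rw [hm, main_pos no_fold hn L.toNat]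
    · have hempty : PySem.List.pyRange 0 (no_fold * L) 1 = [] :=
        PySem.List.pyRange_one_eq_nil (by nlinarith)
      have hinner : PySem.List.pyRange 0 L 1 = [] :=
        PySem.List.pyRange_one_eq_nil (by omega)
      rw [hempty, hinner]
      simp
  · have h1 : PySem.List.pyRange 0 no_fold 1 = [] :=
      PySem.List.pyRange_one_eq_nil (by omega)
    simp [h1, PySem.List.pyRange_zero]
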